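/- GENERATED by tools/from_farm_form.py from prooffarm-gif/accepted/digest_file.3/Proof.lean (a worked proof of the farm's unit `digest_file.3`,
   accepted by the verdict) — do not edit. -/
import Gif.Spec.Units.digest_file_3
import Gif.Spec.AllSegs
import Gif.Spec.Proved.digest_file_3_Lemmas

open X86 X86.User Asan ProgX.Base ProgX.Base.Spec Gif.Spec

/-!
  `digest_file.3` (10585AH … 1058A9H, 18 instructions; gif_driver.c:156-158): the checked load of `gif->SColorMap` and
  `digest_map(h, it)`; the checked load of `gif->ImageCount`, kept in `[rsp+0xc]`, and `digest_int(h, it)`; `[rsp] = h`, `k = 0`,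
  `total = 0`; to the head of the image loop. The return address of `digest_map`, 105871H (`ret12`), is not a cut of the design: the
  unit makes it one of its own, with the function's shared assertion `At`, and walks in two lemmas (Lemmas.lean):

      df3_seg_map      10585AH … `call digest_map` … 105871H (`At ret12`)
      df3_seg_count    105871H … `call digest_int` … 1059AFH (`Head F.imgs.length`)
-/

/-- Segment 3 of `digest_file` takes `At` at 10585AH to the loop invariant `Head m` at 1059AFH (with `m = F.imgs.length`). -/
theorem Gif.Spec.Proved.digest_file_3_ok : Gif.Spec.digest_file_3.Statement := by
  intro Lay hLay μ hμ u₀ hcode h_digest_map h_digest_int h_load8 h_load4 H rest frames F R e ret v hat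
  -- 0x10585a … the call of digest_map … 0x105871 (ret12)
  refine (Gif.Spec.digest_file_3.df3_seg_map Lay hLay μ hμ u₀ hcode h_digest_map h_load8 H rest frames F R e ret v hat).trans ?_
  intro v1 hv1
  -- 0x105871 … the call of digest_int … 0x1059af (the head of the image loop)
  exact Gif.Spec.digest_file_3.df3_seg_count Lay hLay μ hμ u₀ hcode h_digest_int h_load4 H rest frames F R e ret v1 hv1
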